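-- pv_equiv track=rewrite | github.com/CountChu/LeetCodePython | p_0001_0100/solutions/0056-merge-intervals-s6.py | build_h
-- ===== SOURCE A (Python) =====
-- def build_h(h):
--     ls = sorted(h.keys())
--     c = 0
--     count = 0
--     out = {}
--     for v in ls:
--         flag_ls = h[v]
--
--         for f in flag_ls:
--             if f == '+':
--                 count += 1
--             elif f == '-':
--                 count -= 1
--             else:
--                 assert False
--         out[v] = count
--
--     return ls, out
-- ===== SOURCE B (Python) =====
-- def build_h(h):
--     ls = sorted(h)
--     delta = {}
--     for v, fl in h.items():
--         for f in fl:
--             assert f == '+' or f == '-'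
--         delta[v] = 2 * fl.count('+') - len(fl)
--     out = {v: sum(d for u, d in delta.items() if u <= v) for v in ls}
--     return ls, out
-- ===== Notes on version B (the rewrite author's own statement) =====
-- stated objective: alternative
-- what changed: Instead of A's single sorted-order pass carrying a running accumulator, B builds a per-key delta table (2*count('+') - len) and then computes each key's output independently as the sum of the deltas of all keys <= that key (an order-independent range sum over the unsorted table), so no running state is threaded through the sorted traversal.
import Mathlib
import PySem

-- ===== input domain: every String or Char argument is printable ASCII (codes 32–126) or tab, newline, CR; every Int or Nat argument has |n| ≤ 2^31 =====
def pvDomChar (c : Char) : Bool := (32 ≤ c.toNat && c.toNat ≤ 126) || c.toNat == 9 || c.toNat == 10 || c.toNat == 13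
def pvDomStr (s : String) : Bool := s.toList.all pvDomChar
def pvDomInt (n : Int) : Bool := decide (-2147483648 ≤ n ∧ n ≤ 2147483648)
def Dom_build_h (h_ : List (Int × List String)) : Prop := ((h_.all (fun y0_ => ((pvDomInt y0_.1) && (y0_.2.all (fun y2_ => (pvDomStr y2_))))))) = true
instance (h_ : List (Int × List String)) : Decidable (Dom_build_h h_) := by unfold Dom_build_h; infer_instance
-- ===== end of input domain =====

-- B drops A's running accumulator over the sorted keys: it builds a per-key delta table and computes
-- each output independently as the sum of the deltas of all keys ≤ that key (alternative, not faster).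

-- ===== PORT A =====
-- The unused 'c = 0' of the Python is omitted; 'h[v]' is ported as getD v [] (v is always a key,
-- so Python never raises KeyError here); the final 'else: assert False' raises in Python and is
-- excluded by Pre_build_h (the port leaves the count unchanged there).
def build_h (h_ : List (Int × List String)) : List Int × (List (Int × Int)) :=
  let h := PySem.Dict.ofList h_
  let ls := PySem.List.sorted h.keys id false
  let r := ls.foldl (fun (st : Int × PySem.Dict Int Int) v =>
      let flag_ls := h.getD v []
      let count := flag_ls.foldl (fun c f =>
          if f == "+" then c + 1 else if f == "-" then c - 1 else c) st.1
      (count, st.2.insert v count)) (0, PySem.Dict.empty)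
  (ls, r.2.items)

-- ===== PORT B =====
-- The assert raises in Python exactly when a flag is neither "+" nor "-"; excluded by Pre_build_h.
def build_h_alt (h_ : List (Int × List String)) : List Int × (List (Int × Int)) :=
  let h := PySem.Dict.ofList h_
  let ls := PySem.List.sorted h.keys id false
  let delta := h.items.foldl (fun (d : PySem.Dict Int Int) p =>
      d.insert p.1 (2 * (PySem.List.count p.2 "+" : Int) - (p.2.length : Int))) PySem.Dict.empty
  let out := ls.foldl (fun (d : PySem.Dict Int Int) v =>
      d.insert v (((delta.items.filter (fun p => decide (p.1 ≤ v))).map (·.2)).sum)) PySem.Dict.empty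
  (ls, out.items)

-- ===== PRECONDITION & SPEC =====
-- Pre_ excludes exactly the inputs on which both Pythons raise AssertionError:
-- some flag string reachable through the dict is neither "+" nor "-".
def Pre_build_h (h_ : List (Int × List String)) : Prop :=
  ((PySem.Dict.ofList h_).values.all (fun fl => fl.all (fun f => f == "+" || f == "-"))) = true
instance (h_ : List (Int × List String)) : Decidable (Pre_build_h h_) := by unfold Pre_build_h; infer_instance
def pvWitness_build_h : (List (Int × List String)) := [(1, ["+", "+"]), (0, ["-"]), (2, [])]
def Spec_build_h (h_ : List (Int × List String)) (out : List Int × (List (Int × Int))) : Prop := out = build_h_alt h_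
instance (h_ : List (Int × List String)) (out : List Int × (List (Int × Int))) : Decidable (Spec_build_h h_ out) := by unfold Spec_build_h; infer_instance

-- ===== CLAIM (what is proved, stated in full; the proofs are below) =====
def Claim_equal_build_h : Prop := ∀ (h_ : List (Int × List String)), Dom_build_h h_ → Pre_build_h h_ → Spec_build_h h_ (build_h h_)

-- ===== LEMMAS AND PROOFS =====

-- normal form both ports reduce to: insert dval-running-totals along ls
def pvScan (dval : Int → Int) : List Int → Int → PySem.Dict Int Int → PySem.Dict Int Int
  | [], _, out => out
  | v :: ls, c, out => pvScan dval ls (c + dval v) ((out.insert v (c + dval v)))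

theorem pvScan_congr (d1 d2 : Int → Int) (ls : List Int) (c : Int) (out : PySem.Dict Int Int)
    (h : ∀ v ∈ ls, d1 v = d2 v) : pvScan d1 ls c out = pvScan d2 ls c out := by
  induction ls generalizing c out with
  | nil => rfl
  | cons v rest ih =>
      simp only [pvScan, h v (by simp)]
      exact ih _ _ (fun u hu => h u (by simp [hu]))

-- A's inner flag loop adds count('+') - count('-') (the 'else' branch contributes 0)
theorem inner_fold_eq (fl : List String) (c : Int) :
    fl.foldl (fun c f => if f == "+" then c + 1 else if f == "-" then c - 1 else c) c
      = c + ((PySem.List.count fl "+" : Int) - (PySem.List.count fl "-" : Int)) := by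
  induction fl generalizing c with
  | nil => simp [PySem.List.count]
  | cons f rest ih =>
      simp only [List.foldl_cons, ih, PySem.List.count, List.count_cons]
      by_cases h1 : f = "+"
      · simp [h1]; omega
      · by_cases h2 : f = "-"
        · simp [h2]; omega
        · simp [h1, h2]

theorem count_valid (fl : List String)
    (h : (fl.all (fun f => f == "+" || f == "-")) = true) :
    PySem.List.count fl "+" + PySem.List.count fl "-" = fl.length := by
  induction fl with
  | nil => rfl
  | cons f rest ih =>
      simp only [List.all_cons, Bool.and_eq_true, Bool.or_eq_true, beq_iff_eq] at h
      have := ih h.2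
      simp only [PySem.List.count, List.count_cons, List.length_cons] at this ⊢
      rcases h.1 with h1 | h1 <;> simp [h1] <;> omega

theorem a_fold_eq (h : PySem.Dict Int (List String)) (ls : List Int) (c : Int)
    (out : PySem.Dict Int Int) :
    (ls.foldl (fun (st : Int × PySem.Dict Int Int) v =>
        ((h.getD v []).foldl (fun c f =>
            if f == "+" then c + 1 else if f == "-" then c - 1 else c) st.1,
         st.2.insert v ((h.getD v []).foldl (fun c f =>
            if f == "+" then c + 1 else if f == "-" then c - 1 else c) st.1))) (c, out)).2
      = pvScan (fun v => (PySem.List.count (h.getD v []) "+" : Int)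
                          - (PySem.List.count (h.getD v []) "-" : Int)) ls c out := by
  induction ls generalizing c out with
  | nil => simp [pvScan]
  | cons v rest ih =>
      rw [List.foldl_cons, pvScan, ← ih]
      congr 2
      simp only [inner_fold_eq]

-- B's range sums along a strictly increasing list turn into the same scan
theorem b_fold_eq (dval : Int → Int) (pre suf : List Int)
    (hso : (pre ++ suf).Pairwise (· < ·)) (out : PySem.Dict Int Int) :
    suf.foldl (fun (d : PySem.Dict Int Int) v =>
        d.insert v ((((pre ++ suf).filter (fun u => decide (u ≤ v))).map dval).sum)) out
      = pvScan dval suf ((pre.map dval).sum) out := by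
  induction suf generalizing pre out with
  | nil => simp [pvScan]
  | cons v rest ih =>
      have hlt : ∀ u ∈ pre, u < v := fun u hu =>
        (List.pairwise_append.mp hso).2.2 u hu v (by simp)
      have hgt : ∀ u ∈ rest, v < u := fun u hu =>
        List.rel_of_pairwise_cons (List.pairwise_append.mp hso).2.1 hu
      have hfil : (pre ++ v :: rest).filter (fun u => decide (u ≤ v)) = pre ++ [v] := by
        rw [List.filter_append]
        have h1 : pre.filter (fun u => decide (u ≤ v)) = pre :=
          List.filter_eq_self.mpr (fun u hu => by simpa using le_of_lt (hlt u hu))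
        have h2 : (v :: rest).filter (fun u => decide (u ≤ v)) = [v] := by
          simp only [List.filter_cons, decide_eq_true (le_refl v), if_pos]
          rw [List.filter_eq_nil_iff.mpr (fun u hu => by simpa using not_le.mpr (hgt u hu))]
        rw [h1, h2]
      rw [List.foldl_cons, hfil, pvScan]
      have hperm : ((pre ++ [v]) ++ rest).Pairwise (· < ·) := by
        simpa using hso
      have := ih (pre ++ [v]) hperm ((out.insert v (((pre ++ [v]).map dval).sum)))
      simp only [List.map_append, List.sum_append, List.map_cons, List.map_nil,
        List.sum_cons, List.sum_nil, List.append_assoc, List.cons_append, List.nil_append] at this ⊢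
      rw [this]
      ring_nf

-- the delta table's items are the keys paired with their deltas
theorem delta_items_eq (h : PySem.Dict Int (List String)) (hnd : h.keys.Nodup) :
    (h.items.foldl (fun (d : PySem.Dict Int Int) p =>
        d.insert p.1 (2 * (PySem.List.count p.2 "+" : Int) - (p.2.length : Int)))
        PySem.Dict.empty).items
      = h.keys.map (fun k => (k, 2 * (PySem.List.count (h.getD k []) "+" : Int)
                                  - ((h.getD k []).length : Int))) := by
  have H := PySem.Dict.items_foldl_insert_fresh (l := h.items)
      (k := fun p : Int × List String => p.1)
      (v := fun p : Int × List String =>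
        2 * (PySem.List.count p.2 "+" : Int) - (p.2.length : Int))
      (d := PySem.Dict.empty)
      (fun p _ => PySem.Dict.contains_empty _)
      (by simpa [PySem.Dict.keys] using hnd)
  refine H.trans ?_
  have he : (PySem.Dict.empty : PySem.Dict Int Int).items = [] := rfl
  rw [he, List.nil_append]
  conv_lhs => rw [PySem.Dict.items_eq_map_keys h hnd []]
  rw [List.map_map]
  rfl

-- ===== VERDICT (by name: the statement is the Claim_ definition above) =====
theorem build_h_spec : Claim_equal_build_h := by
  intro h_ _ hpre
  simp only [Spec_build_h, build_h, build_h_alt]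
  set h := PySem.Dict.ofList h_ with hh
  have hnd : h.keys.Nodup := PySem.Dict.nodup_keys_ofList h_
  set ls := PySem.List.sorted h.keys id false with hls
  have hperm : ls.Perm h.keys := PySem.List.sorted_perm h.keys id false
  -- ls is strictly increasing
  have hso : ls.Pairwise (· < ·) := by
    have h1 : ls.Pairwise (· ≤ ·) := by
      simpa [id] using PySem.List.sorted_pairwise h.keys id
    have h2 : ls.Nodup := hperm.nodup_iff.mpr hnd
    exact (h1.and h2).imp (fun hab => lt_of_le_of_ne hab.1 hab.2)
  -- B's per-v sum over the table equals the sum over ls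
  have hitems := delta_items_eq h hnd
  have hsum : ∀ v : Int,
      ((((h.items.foldl (fun (d : PySem.Dict Int Int) p =>
          d.insert p.1 (2 * (PySem.List.count p.2 "+" : Int) - (p.2.length : Int)))
          PySem.Dict.empty).items).filter (fun p => decide (p.1 ≤ v))).map (·.2)).sum
      = ((ls.filter (fun u => decide (u ≤ v))).map
          (fun k => 2 * (PySem.List.count (h.getD k []) "+" : Int)
                     - ((h.getD k []).length : Int))).sum := by
    intro v
    rw [hitems]
    have hp : (ls.map (fun k => (k, 2 * (PySem.List.count (h.getD k []) "+" : Int)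
          - ((h.getD k []).length : Int)))).Perm
        (h.keys.map (fun k => (k, 2 * (PySem.List.count (h.getD k []) "+" : Int)
          - ((h.getD k []).length : Int)))) := hperm.map _
    rw [← ((hp.filter _).map (·.2)).sum_eq]
    rw [List.filter_map, List.map_map]
    rfl
  -- both flag-list summaries agree on valid flag lists (Pre_)
  have hvalid : ∀ v ∈ ls,
      2 * (PySem.List.count (h.getD v []) "+" : Int) - ((h.getD v []).length : Int)
      = (PySem.List.count (h.getD v []) "+" : Int) - (PySem.List.count (h.getD v []) "-" : Int) := by
    intro v hv
    have hvk : v ∈ h.keys := (PySem.List.mem_sorted _ _ _ _).mp hv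
    have hmem : h.getD v [] ∈ h.values := by
      rw [PySem.Dict.values_eq_map_keys h hnd []]
      exact List.mem_map_of_mem hvk
    have hcnt := count_valid _ (List.all_eq_true.mp hpre _ hmem)
    omega
  congr 1
  rw [a_fold_eq]
  have hfun : (fun (d : PySem.Dict Int Int) v =>
      d.insert v ((((h.items.foldl (fun (d : PySem.Dict Int Int) p =>
          d.insert p.1 (2 * (PySem.List.count p.2 "+" : Int) - (p.2.length : Int)))
          PySem.Dict.empty).items).filter (fun p => decide (p.1 ≤ v))).map (·.2)).sum)
      = (fun (d : PySem.Dict Int Int) v =>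
      d.insert v ((((([] : List Int) ++ ls).filter (fun u => decide (u ≤ v))).map
          (fun k => 2 * (PySem.List.count (h.getD k []) "+" : Int)
                     - ((h.getD k []).length : Int))).sum)) := by
    funext d v
    rw [hsum v]
    rfl
  rw [hfun, b_fold_eq _ [] ls (by simpa using hso)]
  exact congrArg PySem.Dict.items
    (pvScan_congr _ _ ls 0 PySem.Dict.empty (fun v hv => (hvalid v hv).symm))
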